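-- pv_equiv track=rewrite | github.com/Alto-R/EVIPV | code/preprocess_clone_months.py | parse_month_list
-- ===== SOURCE A (Python) =====
-- def parse_month_list(target_months_str: str, source_month: int) -> list[int]:
--     months = []
--     for part in target_months_str.split(","):
--         part = part.strip()
--         if not part:
--             continue
--         value = int(part)
--         if not 1 <= value <= 12:
--             raise ValueError(f"Invalid month value: {value}")
--         months.append(value)
--     months = sorted(set(months))
--     if source_month in months:
--         months.remove(source_month)
--     return months
-- ===== SOURCE B (Python) =====
-- def parse_month_list(target_months_str: str, source_month: int) -> list[int]:
--     def _insert(lst, v):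
--         # insert v into a strictly increasing list, keeping it strictly increasing
--         if not lst or v < lst[0]:
--             return [v] + lst
--         if v == lst[0]:
--             return lst
--         return [lst[0]] + _insert(lst[1:], v)
--
--     out = []
--     for part in target_months_str.split(","):
--         part = part.strip()
--         if not part:
--             continue
--         value = int(part)
--         if not 1 <= value <= 12:
--             raise ValueError(f"Invalid month value: {value}")
--         if value != source_month:
--             out = _insert(out, value)
--     return out
-- ===== Notes on version B (the rewrite author's own statement) =====
-- stated objective: alternative
-- what changed: B never builds an intermediate month list: instead of collect-all then sorted(set(...)) then list.remove, it maintains the final answer directly as a strictly increasing duplicate-free list via recursive ordered insertion, skipping source_month at insertion time, so the sort/set/remove post-processing stage disappears.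
import Mathlib
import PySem

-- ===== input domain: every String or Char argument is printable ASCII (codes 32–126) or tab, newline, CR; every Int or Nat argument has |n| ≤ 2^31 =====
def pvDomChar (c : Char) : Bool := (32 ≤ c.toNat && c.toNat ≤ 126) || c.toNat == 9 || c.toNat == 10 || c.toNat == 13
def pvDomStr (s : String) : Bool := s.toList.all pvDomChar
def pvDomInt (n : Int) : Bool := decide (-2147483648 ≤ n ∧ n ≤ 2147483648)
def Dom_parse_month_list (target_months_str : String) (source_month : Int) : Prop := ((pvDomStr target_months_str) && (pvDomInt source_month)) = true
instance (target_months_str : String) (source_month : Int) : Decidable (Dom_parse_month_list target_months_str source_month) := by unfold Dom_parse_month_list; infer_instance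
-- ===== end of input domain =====

-- B drops the collect/sort(set)/remove pipeline: it maintains the final answer directly as a
-- strictly increasing duplicate-free list by recursive ordered insertion, skipping
-- source_month at insertion time (objective: alternative algorithm).

-- ===== PORT A =====
-- one loop iteration of A: strip, skip empty, int() (none = ValueError, excluded by Pre_),
-- range check (failure raises, excluded by Pre_), append
def pmlStepA (acc : List Int) (part : String) : List Int :=
  let p := PySem.Str.strip part
  if p = "" then acc
  else match PySem.Int.ofStr? p with
    | none => acc
    | some v => if 1 ≤ v ∧ v ≤ 12 then acc ++ [v] else acc

def parse_month_list (target_months_str : String) (source_month : Int) : List Int :=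
  let months := ((PySem.Str.split? target_months_str ",").getD []).foldl pmlStepA []
  let ms := PySem.List.sorted (PySem.Set.ofList months) (fun x => x) false
  if source_month ∈ ms then (PySem.List.remove? ms source_month).getD ms else ms

-- ===== PORT B =====
-- B's helper _insert: insert v into a strictly increasing list, keeping it strictly increasing
def pmlIns (lst : List Int) (v : Int) : List Int :=
  match lst with
  | [] => [v]
  | x :: rest =>
      if v < x then v :: x :: rest
      else if v = x then x :: rest
      else x :: pmlIns rest v

-- one loop iteration of B: same parse/validate, then ordered insertion unless v = source_month
def pmlStepB (src : Int) (acc : List Int) (part : String) : List Int :=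
  let p := PySem.Str.strip part
  if p = "" then acc
  else match PySem.Int.ofStr? p with
    | none => acc
    | some v => if 1 ≤ v ∧ v ≤ 12 then (if v ≠ src then pmlIns acc v else acc) else acc

def parse_month_list_alt (target_months_str : String) (source_month : Int) : List Int :=
  ((PySem.Str.split? target_months_str ",").getD []).foldl (pmlStepB source_month) []

-- ===== PRECONDITION & SPEC =====
-- Pre_ excludes exactly the inputs on which A (and B alike) raises ValueError: a part whose
-- stripped form is non-empty and is not an int literal in 1..12.
def Pre_parse_month_list (target_months_str : String) (source_month : Int) : Prop :=
  (((PySem.Str.split? target_months_str ",").getD []).all (fun part =>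
    let p := PySem.Str.strip part
    p == "" || (match PySem.Int.ofStr? p with
                | some v => decide (1 ≤ v ∧ v ≤ 12)
                | none => false))) = true

instance (target_months_str : String) (source_month : Int) : Decidable (Pre_parse_month_list target_months_str source_month) := by
  unfold Pre_parse_month_list; infer_instance

def pvWitness_parse_month_list : String × Int := (" 1, 5 ,5,,12", 5)

def Spec_parse_month_list (target_months_str : String) (source_month : Int) (out : List Int) : Prop := out = parse_month_list_alt target_months_str source_month
instance (target_months_str : String) (source_month : Int) (out : List Int) : Decidable (Spec_parse_month_list target_months_str source_month out) := by unfold Spec_parse_month_list; infer_instance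

-- ===== CLAIM (what is proved, stated in full; the proofs are below) =====
def Claim_equal_parse_month_list : Prop := ∀ (target_months_str : String) (source_month : Int), Dom_parse_month_list target_months_str source_month → Pre_parse_month_list target_months_str source_month → Spec_parse_month_list target_months_str source_month (parse_month_list target_months_str source_month)

-- ===== LEMMAS AND PROOFS =====

lemma pmlIns_mem (lst : List Int) (v a : Int) : a ∈ pmlIns lst v ↔ a = v ∨ a ∈ lst := by
  induction lst with
  | nil => simp [pmlIns]
  | cons x rest ih =>
    simp only [pmlIns]
    split_ifs with h1 h2
    · simp
    · subst h2; simp only [List.mem_cons]; tauto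
    · simp [ih]; tauto

lemma pmlIns_pairwise (lst : List Int) (v : Int) (h : lst.Pairwise (· < ·)) :
    (pmlIns lst v).Pairwise (· < ·) := by
  induction lst with
  | nil => simp [pmlIns]
  | cons x rest ih =>
    rcases List.pairwise_cons.mp h with ⟨hx, hrest⟩
    simp only [pmlIns]
    split_ifs with h1 h2
    · exact List.pairwise_cons.mpr ⟨by
        intro b hb
        rcases List.mem_cons.mp hb with rfl | hb
        · exact h1
        · exact lt_trans h1 (hx b hb), h⟩
    · exact h
    · refine List.pairwise_cons.mpr ⟨?_, ih hrest⟩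
      intro b hb
      rcases (pmlIns_mem rest v b).mp hb with rfl | hb
      · omega
      · exact hx b hb

-- joint invariant of the two loops: A's accumulator collects months in order, B's is the
-- strictly increasing list of A's collected months with src removed; A's months stay in 1..12
lemma pml_fold_inv (src : Int) (parts : List String) (accA accB : List Int)
    (hA : ∀ v ∈ accA, 1 ≤ v ∧ v ≤ 12)
    (hB : accB.Pairwise (· < ·))
    (hmem : ∀ a, a ∈ accB ↔ a ∈ accA ∧ a ≠ src) :
    (∀ v ∈ parts.foldl pmlStepA accA, 1 ≤ v ∧ v ≤ 12) ∧
    (parts.foldl (pmlStepB src) accB).Pairwise (· < ·) ∧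
    (∀ a, a ∈ parts.foldl (pmlStepB src) accB ↔ a ∈ parts.foldl pmlStepA accA ∧ a ≠ src) := by
  induction parts generalizing accA accB with
  | nil => exact ⟨hA, hB, hmem⟩
  | cons part rest ih =>
    simp only [List.foldl_cons]
    have hstep : (∀ v ∈ pmlStepA accA part, 1 ≤ v ∧ v ≤ 12) ∧
        (pmlStepB src accB part).Pairwise (· < ·) ∧
        (∀ a, a ∈ pmlStepB src accB part ↔ a ∈ pmlStepA accA part ∧ a ≠ src) := by
      simp only [pmlStepA, pmlStepB]
      by_cases hp : PySem.Str.strip part = ""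
      · rw [if_pos hp, if_pos hp]; exact ⟨hA, hB, hmem⟩
      · rw [if_neg hp, if_neg hp]
        cases hof : PySem.Int.ofStr? (PySem.Str.strip part) with
        | none => exact ⟨hA, hB, hmem⟩
        | some v =>
          dsimp only
          by_cases hr : 1 ≤ v ∧ v ≤ 12
          · rw [if_pos hr, if_pos hr]
            refine ⟨?_, ?_, ?_⟩
            · intro w hw
              rcases List.mem_append.mp hw with hw | hw
              · exact hA w hw
              · simp at hw; omega
            · by_cases hv : v ≠ src
              · rw [if_pos hv]; exact pmlIns_pairwise accB v hB
              · rw [if_neg hv]; exact hB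
            · intro a
              by_cases hv : v ≠ src
              · rw [if_pos hv, pmlIns_mem, hmem a]
                simp only [List.mem_append, List.mem_singleton]
                constructor
                · rintro (rfl | ⟨ha, hane⟩)
                  · exact ⟨Or.inr rfl, hv⟩
                  · exact ⟨Or.inl ha, hane⟩
                · rintro ⟨ha | rfl, hane⟩
                  · exact Or.inr ⟨ha, hane⟩
                  · exact Or.inl rfl
              · rw [if_neg hv]
                obtain rfl := not_not.mp hv
                rw [hmem a]
                simp only [List.mem_append, List.mem_singleton]
                constructor
                · rintro ⟨ha, hane⟩; exact ⟨Or.inl ha, hane⟩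
                · rintro ⟨ha | rfl, hane⟩
                  · exact ⟨ha, hane⟩
                  · exact absurd rfl hane
          · rw [if_neg hr, if_neg hr]; exact ⟨hA, hB, hmem⟩
    exact ih _ _ hstep.1 hstep.2.1 hstep.2.2

-- A's sorted(set(months)) is the ascending enumeration of the distinct months
lemma pml_sorted_eq (months : List Int) (hb : ∀ v ∈ months, 1 ≤ v ∧ v ≤ 12) :
    PySem.List.sorted (PySem.Set.ofList months) (fun x => x) false
      = (PySem.List.pyRange 1 13 1).filter (fun m => decide (m ∈ months)) := by
  apply PySem.List.sorted_eq_of_perm_of_pairwise_lt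
  · refine (List.perm_ext_iff_of_nodup ?_ (PySem.Set.nodup_ofList months)).mpr ?_
    · exact (PySem.List.nodup_pyRange_one 1 13).filter _
    · intro a
      simp only [List.mem_filter, PySem.List.mem_pyRange_one, PySem.Set.mem_ofList,
        decide_eq_true_eq]
      constructor
      · rintro ⟨_, h⟩; exact h
      · intro h; exact ⟨by have := hb a h; omega, h⟩
  · exact (PySem.List.pairwise_lt_pyRange_one 1 13).filter _

-- ===== VERDICT (by name: the statement is the Claim_ definition above) =====
theorem parse_month_list_spec : Claim_equal_parse_month_list := by
  intro s src _hdom _hpre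
  unfold Spec_parse_month_list
  simp only [parse_month_list, parse_month_list_alt]
  obtain ⟨hb, hBpw, hBmem⟩ :=
    pml_fold_inv src ((PySem.Str.split? s ",").getD []) [] [] (by simp) (by simp) (by simp)
  set months := ((PySem.Str.split? s ",").getD []).foldl pmlStepA [] with hm
  set bout := ((PySem.Str.split? s ",").getD []).foldl (pmlStepB src) [] with hbm
  rw [pml_sorted_eq months hb]
  -- target: the ascending list of distinct months ≠ src; both sides equal it
  have htgt : bout = (PySem.List.pyRange 1 13 1).filter
      (fun m => decide (m ∈ months) && decide (m ≠ src)) := by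
    have h1 : PySem.List.sorted bout (fun x => x) false = bout := by
      apply PySem.List.sorted_eq_of_perm_of_pairwise_lt
      · exact List.Perm.refl bout
      · exact hBpw
    have h2 : PySem.List.sorted bout (fun x => x) false
        = (PySem.List.pyRange 1 13 1).filter
            (fun m => decide (m ∈ months) && decide (m ≠ src)) := by
      apply PySem.List.sorted_eq_of_perm_of_pairwise_lt
      · refine (List.perm_ext_iff_of_nodup ?_
          (hBpw.imp fun h => ne_of_lt h)).mpr ?_
        · exact (PySem.List.nodup_pyRange_one 1 13).filter _
        · intro a
          simp only [List.mem_filter, PySem.List.mem_pyRange_one, Bool.and_eq_true,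
            decide_eq_true_eq, hBmem a]
          constructor
          · rintro ⟨_, h1, h2⟩; exact ⟨h1, h2⟩
          · rintro ⟨h1, h2⟩; exact ⟨by have := hb a h1; omega, h1, h2⟩
      · exact (PySem.List.pairwise_lt_pyRange_one 1 13).filter _
    rw [← h1, h2]
  rw [htgt]
  by_cases hsrc : src ∈ (PySem.List.pyRange 1 13 1).filter (fun m => decide (m ∈ months))
  · simp only [hsrc, if_true]
    rw [PySem.List.remove?_eq_some_erase _ _ hsrc, Option.getD_some]
    rw [((PySem.List.nodup_pyRange_one 1 13).filter _).erase_eq_filter]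
    rw [List.filter_filter]
    apply List.filter_congr
    intro m _
    by_cases h : m = src <;> simp [h, Bool.and_comm]
  · simp only [hsrc, if_false]
    apply List.filter_congr
    intro m hmem
    by_cases hmm : m ∈ months
    · have : m ≠ src := by
        rintro rfl; exact hsrc (List.mem_filter.mpr ⟨hmem, by simpa⟩)
      simp [hmm, this]
    · simp [hmm]
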